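-- pv_equiv track=rewrite | github.com/2024eli/AI | xWord/xW.py | symmetry
-- ===== SOURCE A (Python) =====
-- def symmetry(pzl):
--   #transform 180
--   pzlFlip = pzl[::-1]
--   flip = []
--   for i in range(len(pzlFlip)):
--     flip.append(pzlFlip[i][::-1])
--   for i, f in enumerate(flip):
--     for j, ch in enumerate(f):
--       if ch == '#' and not pzl[i][j].isalpha():
--         add(pzl, j, i, '#')
--       if ch.isalpha() and pzl[i][j] == '.':
--         add(pzl, j, i, '-')
--   return pzl
--
-- def add(pzl, x, y, ch):
--   pzl[y] = pzl[y][0:x] + ch + pzl[y][x+1:]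
--   return pzl
-- ===== SOURCE B (Python) =====
-- def _cell(c, m):
--   # m is the 180-degree mirror cell in the original grid
--   if m == '#' and not c.isalpha():
--     return '#'
--   if m.isalpha() and c == '.':
--     return '-'
--   return c
--
-- def symmetry(pzl):
--   n = len(pzl)
--   out = []
--   for i, row in enumerate(pzl):
--     mirror = pzl[n - 1 - i]
--     C = len(row)
--     out.append(''.join(_cell(row[j], mirror[C - 1 - j]) for j in range(C)))
--   pzl[:] = out   # A mutates pzl in place; keep the same observable effect
--   return pzl
-- ===== Notes on version B (the rewrite author's own statement) =====
-- stated objective: simpler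
-- what changed: Replaces A's build-two-reversed-copies-then-mutate-rows-in-place scheme with a single pure per-cell pass that reads each cell and its 180-degree mirror directly from the original grid and rebuilds every row with join.
-- outside the precondition, e.g. on symmetry(['a', '..']): A returns ['a', '-.'], B raises IndexError
import Mathlib
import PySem

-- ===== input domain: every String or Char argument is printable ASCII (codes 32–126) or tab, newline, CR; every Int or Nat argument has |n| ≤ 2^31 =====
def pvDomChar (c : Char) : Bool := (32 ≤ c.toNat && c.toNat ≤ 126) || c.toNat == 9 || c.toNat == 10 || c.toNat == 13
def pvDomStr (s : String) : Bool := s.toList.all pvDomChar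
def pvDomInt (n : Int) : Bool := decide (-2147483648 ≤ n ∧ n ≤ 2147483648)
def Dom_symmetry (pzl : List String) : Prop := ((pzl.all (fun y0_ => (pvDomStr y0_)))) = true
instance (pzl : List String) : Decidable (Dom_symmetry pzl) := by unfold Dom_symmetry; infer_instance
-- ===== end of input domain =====

-- B (symmetry_alt) replaces A's reversed-copy-then-mutate-in-place scheme with a single pure
-- per-cell pass over the original grid (objective: simpler); equal return values on Pre_ (rows whose
-- 180-degree partner row has the same length).
-- ===== PORT A =====
-- A mutates pzl in place (row reassignment); the equivalence proved here is about the
-- return value (B performs the same in-place replacement in Python).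
-- add(pzl, x, y, ch): pzl[y] = pzl[y][0:x] + ch + pzl[y][x+1:]
def addA (pzl : List String) (x y : Int) (ch : Char) : List String :=
  PySem.List.pySetD pzl y (String.ofList (
    PySem.List.slice (PySem.List.pyGetD pzl y "").toList (some 0) (some x)
    ++ [ch]
    ++ PySem.List.slice (PySem.List.pyGetD pzl y "").toList (some (x + 1)) none))

-- the body of the inner 'for j, ch in enumerate(f)' loop; none = IndexError on pzl[i][j]
def innerStep (i : Int) (st : Option (List String)) (q : Int × Char) : Option (List String) :=
  st.bind (fun pzl =>
    (if q.2 = '#' then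
       match PySem.List.pyGet? (PySem.List.pyGetD pzl i "").toList q.1 with
       | none => none
       | some c => if PySem.Chars.isalpha c = false then some (addA pzl q.1 i '#') else some pzl
     else some pzl).bind (fun pzl2 =>
     if PySem.Chars.isalpha q.2 then
       match PySem.List.pyGet? (PySem.List.pyGetD pzl2 i "").toList q.1 with
       | none => none
       | some c => if c = '.' then some (addA pzl2 q.1 i '-') else some pzl2
     else some pzl2))

def symmetry (pzl : List String) : List String :=
  let pzlFlip := (PySem.List.slice? pzl none none (-1)).getD []      -- pzl[::-1]
  let flip := (PySem.List.pyRange 0 (pzlFlip.length : Int) 1).foldl  -- for i in range(len(pzlFlip)): flip.append(pzlFlip[i][::-1])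
      (fun acc i => acc ++ [(PySem.Str.slice? (PySem.List.pyGetD pzlFlip i "") none none (-1)).getD ""]) []
  ((PySem.List.enumerate flip 0).foldl
      (fun st p => (PySem.List.enumerate p.2.toList 0).foldl (innerStep p.1) st)
      (some pzl)).getD pzl                                           -- none (IndexError) is excluded by Pre_

-- ===== PORT B =====
def cellB (c m : Char) : Char :=
  if m = '#' ∧ PySem.Chars.isalpha c = false then '#'
  else if PySem.Chars.isalpha m ∧ c = '.' then '-'
  else c

def altRow (pzl : List String) (i : Nat) : String :=
  let row := (pzl.getD i "").toList
  let mirror := (pzl.getD (pzl.length - 1 - i) "").toList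
  let C := row.length
  String.ofList ((List.range C).map (fun j => cellB (row.getD j ' ') (mirror.getD (C - 1 - j) ' ')))

def symmetry_alt (pzl : List String) : List String :=
  (List.range pzl.length).map (fun i => altRow pzl i)

-- ===== PRECONDITION & SPEC =====
-- Pre_ excludes ragged grids whose 180-degree-paired rows differ in length: there A raises
-- IndexError on pzl[i][j] unless every overhanging mirror cell happens to be non-'#', non-alpha
-- (an accident of short-circuit evaluation), and B raises IndexError on all of them.
def Pre_symmetry (pzl : List String) : Prop :=
  ∀ i < pzl.length, (pzl.getD i "").toList.length = (pzl.getD (pzl.length - 1 - i) "").toList.length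
instance (pzl : List String) : Decidable (Pre_symmetry pzl) := by unfold Pre_symmetry; infer_instance

def pvWitness_symmetry : List String := ["a#", ".b"]

def Spec_symmetry (pzl : List String) (out : List String) : Prop := out = symmetry_alt pzl
instance (pzl : List String) (out : List String) : Decidable (Spec_symmetry pzl out) := by unfold Spec_symmetry; infer_instance

-- ===== CLAIM (what is proved, stated in full; the proofs are below) =====
def Claim_equal_symmetry : Prop := ∀ (pzl : List String), Dom_symmetry pzl → Pre_symmetry pzl → Spec_symmetry pzl (symmetry pzl)

-- ===== LEMMAS AND PROOFS =====

-- the fully transformed row i, as a char list ((altRow pzl i).toList)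
def bRow (pzl : List String) (i : Nat) : List Char :=
  (List.range (pzl.getD i "").toList.length).map (fun j =>
    cellB ((pzl.getD i "").toList.getD j ' ')
          ((pzl.getD (pzl.length - 1 - i) "").toList.getD ((pzl.getD i "").toList.length - 1 - j) ' '))

-- row i mid-transformation: first j cells done, rest original
def mixRow (newR origR : List Char) (j : Nat) : List Char := newR.take j ++ origR.drop j

lemma getD_append_cons {pre suf : List String} {x : String} {d : String} :
    (pre ++ x :: suf).getD pre.length d = x := by
  simp [List.getD_eq_getElem?_getD]

lemma set_append_cons {pre suf : List String} {x v : String} :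
    (pre ++ x :: suf).set pre.length v = pre ++ v :: suf := by
  rw [List.set_append_right _ _ (le_refl _)]
  simp

-- one inner-loop step turns mixRow j into mixRow (j+1)
lemma step_mix (pre suf : List String) (newR origR revM : List Char) (j : Nat)
    (hC : newR.length = origR.length) (hj : j < origR.length)
    (hnew : newR.getD j ' ' = cellB (origR.getD j ' ') (revM.getD j ' ')) :
    innerStep (pre.length : Int) (some (pre ++ [String.ofList (mixRow newR origR j)] ++ suf)) ((j : Int), revM.getD j ' ')
      = some (pre ++ [String.ofList (mixRow newR origR (j + 1))] ++ suf) := by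
  have hjN : j < newR.length := by omega
  have htake : (newR.take j).length = j := by simp; omega
  have hgetj : (mixRow newR origR j)[j]? = some (origR.getD j ' ') := by
    rw [mixRow, List.getElem?_append_right (by omega), htake]
    simp [List.getElem?_drop, List.getD_eq_getElem?_getD, List.getElem?_eq_getElem hj]
  have htakemix : (mixRow newR origR j).take j = newR.take j := by
    rw [mixRow, List.take_append]
    simp [htake]
  have hdropcons : origR.drop j = origR.getD j ' ' :: origR.drop (j + 1) := by
    rw [List.drop_eq_getElem_cons hj]
    simp [List.getD_eq_getElem?_getD, List.getElem?_eq_getElem hj]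
  have hdropmix : (mixRow newR origR j).drop (j + 1) = origR.drop (j + 1) := by
    have hlen : (newR.take j ++ [origR.getD j ' ']).length = j + 1 := by simp [htake]
    rw [mixRow, hdropcons,
        show newR.take j ++ origR.getD j ' ' :: origR.drop (j + 1)
          = (newR.take j ++ [origR.getD j ' ']) ++ origR.drop (j + 1) from by simp,
        ← hlen, List.drop_left]
  have hmixsucc : mixRow newR origR (j + 1) = newR.take j ++ [newR.getD j ' '] ++ origR.drop (j + 1) := by
    rw [mixRow, List.take_succ]
    simp [List.getElem?_eq_getElem hjN, List.getD_eq_getElem?_getD]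
  have hsame : mixRow newR origR j = newR.take j ++ [origR.getD j ' '] ++ origR.drop (j + 1) := by
    rw [mixRow, hdropcons]; simp
  have hS : ∀ (x : String), pre ++ [x] ++ suf = pre ++ x :: suf := by simp
  have hread : PySem.List.pyGet? (PySem.List.pyGetD (pre ++ String.ofList (mixRow newR origR j) :: suf) (↑pre.length) "").toList (↑j) = some (origR.getD j ' ') := by
    rw [PySem.List.pyGetD_natCast, getD_append_cons, PySem.List.pyGet?_natCast]
    simpa using hgetj
  have hwrite : ∀ ch, addA (pre ++ String.ofList (mixRow newR origR j) :: suf) (↑j) (↑pre.length) ch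
      = pre ++ String.ofList (newR.take j ++ [ch] ++ origR.drop (j + 1)) :: suf := by
    intro ch
    unfold addA
    rw [PySem.List.pyGetD_natCast, getD_append_cons]
    have hc : ((j : Int) + 1) = ((j + 1 : Nat) : Int) := by push_cast; ring
    rw [PySem.List.slice_zero_start, hc]
    simp only [String.toList_ofList]
    rw [PySem.List.slice_to_natCast, PySem.List.slice_from_natCast, htakemix, hdropmix,
        PySem.List.pySetD_natCast, set_append_cons]
  rw [hS, hS]
  unfold innerStep
  dsimp only [Option.bind]
  by_cases hm : revM.getD j ' ' = '#'
  · rw [if_pos hm, hread]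
    dsimp only
    by_cases ha : PySem.Chars.isalpha (origR.getD j ' ') = false
    · have hv : newR.getD j ' ' = '#' := by
        rw [hnew, hm]; unfold cellB
        split_ifs with h1 h2
        · rfl
        all_goals exact absurd ⟨rfl, ha⟩ h1
      rw [if_pos ha, hwrite]
      dsimp only [Option.bind]
      rw [hm, if_neg (by decide : ¬ PySem.Chars.isalpha '#' = true), hmixsucc, hv]
    · have hv : newR.getD j ' ' = origR.getD j ' ' := by
        rw [hnew, hm]; simp only [cellB]
        rw [if_neg (fun h => ha h.2), if_neg (fun h => absurd h.1 (by decide))]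
      rw [if_neg ha]
      dsimp only [Option.bind]
      rw [hm, if_neg (by decide : ¬ PySem.Chars.isalpha '#' = true), hmixsucc, hv, ← hsame]
  · rw [if_neg hm]
    dsimp only [Option.bind]
    by_cases hal : PySem.Chars.isalpha (revM.getD j ' ') = true
    · rw [if_pos hal, hread]
      dsimp only
      by_cases hdot : origR.getD j ' ' = '.'
      · have hv : newR.getD j ' ' = '-' := by
          rw [hnew]; simp only [cellB]
          rw [if_neg (fun h => hm h.1), if_pos ⟨hal, hdot⟩]
        rw [if_pos hdot, hwrite, hmixsucc, hv]
      · have hv : newR.getD j ' ' = origR.getD j ' ' := by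
          rw [hnew]; simp only [cellB]
          rw [if_neg (fun h => hm h.1), if_neg (fun h => hdot h.2)]
        rw [if_neg hdot, hmixsucc, hv, ← hsame]
    · have hv : newR.getD j ' ' = origR.getD j ' ' := by
        rw [hnew]; simp only [cellB]
        rw [if_neg (fun h => hm h.1), if_neg (fun h => hal h.1)]
      rw [if_neg hal, hmixsucc, hv, ← hsame]

-- the whole inner loop finishes row i
lemma inner_loop (pre suf : List String) (newR origR revM : List Char) (j : Nat)
    (hC : newR.length = origR.length) (hM : revM.length = origR.length) (hj : j ≤ origR.length)
    (hnew : ∀ k, j ≤ k → k < origR.length →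
      newR.getD k ' ' = cellB (origR.getD k ' ') (revM.getD k ' ')) :
    (PySem.List.enumerate (revM.drop j) (j : Int)).foldl (innerStep (pre.length : Int))
        (some (pre ++ [String.ofList (mixRow newR origR j)] ++ suf))
      = some (pre ++ [String.ofList newR] ++ suf) := by
  induction hn : origR.length - j generalizing j with
  | zero =>
    have hj' : j = origR.length := by omega
    subst hj'
    rw [show revM.drop origR.length = [] from List.drop_eq_nil_of_le (by omega),
        PySem.List.enumerate_nil, List.foldl_nil, mixRow,
        List.take_of_length_le (by omega), List.drop_eq_nil_of_le (by omega), List.append_nil]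
  | succ n ih =>
    have hjlt : j < origR.length := by omega
    have hdropM : revM.drop j = revM.getD j ' ' :: revM.drop (j + 1) := by
      rw [List.drop_eq_getElem_cons (show j < revM.length by omega)]
      simp [List.getD_eq_getElem?_getD, List.getElem?_eq_getElem (show j < revM.length by omega)]
    rw [hdropM, PySem.List.enumerate_cons, List.foldl_cons,
        step_mix pre suf newR origR revM j hC hjlt (hnew j le_rfl hjlt),
        show ((j : Int) + 1) = ((j + 1 : Nat) : Int) from by push_cast; ring]
    exact ih (j + 1) (by omega) (fun k hk1 hk2 => hnew k (by omega) hk2) (by omega)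

-- the rows of A's 'flip' list: 180-degree rotated copies of the original rows
def flipRows (pzl : List String) : List String :=
  pzl.reverse.map (fun s => String.ofList s.toList.reverse)

lemma altRow_eq_bRow (pzl : List String) (i : Nat) :
    altRow pzl i = String.ofList (bRow pzl i) := rfl

-- the outer loop completes rows i, i+1, …, one row per inner_loop run
lemma outer_loop (pzl : List String) (hpre : Pre_symmetry pzl) (i : Nat) (hi : i ≤ pzl.length) :
    (PySem.List.enumerate ((flipRows pzl).drop i) (i : Int)).foldl
        (fun st p => (PySem.List.enumerate p.2.toList 0).foldl (innerStep p.1) st)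
        (some ((List.range i).map (altRow pzl) ++ pzl.drop i))
      = some ((List.range pzl.length).map (altRow pzl)) := by
  induction hn : pzl.length - i generalizing i with
  | zero =>
    have hend : i = pzl.length := by omega
    subst hend
    rw [show (flipRows pzl).drop pzl.length = [] from
          List.drop_eq_nil_of_le (by simp [flipRows]),
        show pzl.drop pzl.length = [] from List.drop_eq_nil_of_le (le_refl _),
        PySem.List.enumerate_nil, List.foldl_nil, List.append_nil]
  | succ n ih =>
    have hilt : i < pzl.length := by omega
    have hmlt : pzl.length - 1 - i < pzl.length := by omega
    have hfdrop : (flipRows pzl).drop i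
        = String.ofList (pzl[pzl.length - 1 - i]'hmlt).toList.reverse :: (flipRows pzl).drop (i + 1) := by
      rw [List.drop_eq_getElem_cons (by simp [flipRows]; omega)]
      congr 1
      simp [flipRows, List.getElem_reverse]
    have hpdrop : pzl.drop i = pzl[i] :: pzl.drop (i + 1) := List.drop_eq_getElem_cons hilt
    have hgetDi : pzl.getD i "" = pzl[i] := List.getD_eq_getElem pzl "" hilt
    have hgetDm : pzl.getD (pzl.length - 1 - i) "" = pzl[pzl.length - 1 - i]'hmlt :=
      List.getD_eq_getElem pzl "" hmlt
    have hC : (bRow pzl i).length = (pzl[i]).toList.length := by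
      rw [bRow, List.length_map, List.length_range, hgetDi]
    have hM : ((pzl[pzl.length - 1 - i]'hmlt).toList.reverse).length = (pzl[i]).toList.length := by
      have := hpre i hilt
      rw [hgetDi, hgetDm] at this
      simp [this]
    have hnew : ∀ k, 0 ≤ k → k < (pzl[i]).toList.length →
        (bRow pzl i).getD k ' ' = cellB ((pzl[i]).toList.getD k ' ')
          (((pzl[pzl.length - 1 - i]'hmlt).toList.reverse).getD k ' ') := by
      intro k _ hk
      have hkC : k < (pzl.getD i "").toList.length := by rw [hgetDi]; exact hk
      have h1 : (bRow pzl i).getD k ' '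
          = cellB ((pzl.getD i "").toList.getD k ' ')
              ((pzl.getD (pzl.length - 1 - i) "").toList.getD ((pzl.getD i "").toList.length - 1 - k) ' ') := by
        rw [bRow, List.getD_eq_getElem?_getD, List.getElem?_map, List.getElem?_range hkC]
        rfl
      have h2 : ((pzl[pzl.length - 1 - i]'hmlt).toList.reverse).getD k ' '
          = (pzl[pzl.length - 1 - i]'hmlt).toList.getD ((pzl[i]).toList.length - 1 - k) ' ' := by
        have hk' : k < ((pzl[pzl.length - 1 - i]'hmlt).toList.reverse).length := by rw [hM]; exact hk
        have hMl : (pzl[pzl.length - 1 - i]'hmlt).toList.length = (pzl[i]).toList.length := by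
          have := hM; simpa using this
        have hkr : (pzl[i]).toList.length - 1 - k < (pzl[pzl.length - 1 - i]'hmlt).toList.length := by
          rw [hMl]; omega
        rw [List.getD_eq_getElem _ _ hk', List.getD_eq_getElem _ _ hkr, List.getElem_reverse]
        congr 1
        rw [hMl]
      rw [h1, h2, hgetDi, hgetDm]
    have hinner := inner_loop ((List.range i).map (altRow pzl)) (pzl.drop (i + 1)) (bRow pzl i)
        ((pzl[i]).toList) ((pzl[pzl.length - 1 - i]'hmlt).toList.reverse) 0 hC hM (Nat.zero_le _)
        (fun k h1 h2 => hnew k h1 h2)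
    rw [hfdrop, PySem.List.enumerate_cons, List.foldl_cons, hpdrop]
    simp only [mixRow, List.take_zero, List.drop_zero, List.nil_append, String.ofList_toList,
        List.length_map, List.length_range, Nat.cast_zero] at hinner
    dsimp only
    rw [String.toList_ofList]
    rw [show ((List.range i).map (altRow pzl) ++ pzl[i] :: pzl.drop (i + 1))
          = (List.range i).map (altRow pzl) ++ [pzl[i]] ++ pzl.drop (i + 1) from by simp]
    rw [hinner]
    rw [show (List.range i).map (altRow pzl) ++ [String.ofList (bRow pzl i)] ++ pzl.drop (i + 1)
          = (List.range (i + 1)).map (altRow pzl) ++ pzl.drop (i + 1) from by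
        rw [← altRow_eq_bRow, List.range_succ, List.map_append]; simp]
    rw [show ((i : Int) + 1) = ((i + 1 : Nat) : Int) from by push_cast; ring]
    exact ih (i + 1) (by omega) (by omega)

-- ===== VERDICT (by name: the statement is the Claim_ definition above) =====
theorem symmetry_spec : Claim_equal_symmetry := by
  intro pzl _ hpre
  unfold Spec_symmetry symmetry symmetry_alt
  dsimp only
  rw [PySem.List.slice?_none_none_neg_one]
  simp only [Option.getD_some]
  rw [PySem.List.foldl_pyRange_zero_pyGetD' pzl.reverse ""
        (fun acc s => acc ++ [(PySem.Str.slice? s none none (-1)).getD ""]) [],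
      PySem.List.foldl_append_singleton_eq_map, List.nil_append]
  rw [show (fun s => (PySem.Str.slice? s none none (-1)).getD "")
        = (fun s : String => String.ofList s.toList.reverse) from
      funext fun s => by rw [PySem.Str.slice?_none_none_neg_one]; rfl]
  have h := outer_loop pzl hpre 0 (Nat.zero_le _)
  simp only [List.drop_zero, List.range_zero, List.map_nil, List.nil_append, Nat.cast_zero] at h
  rw [show pzl.reverse.map (fun s : String => String.ofList s.toList.reverse) = flipRows pzl from rfl,
      h, Option.getD_some]
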